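-- pv_equiv track=rewrite | github.com/rahul-dhavalikar/Product-Title-Analysis | source_code/features_final.py | num_of_repeating_words
-- ===== SOURCE A (Python) =====
-- def num_of_repeating_words(title):
--     title = title.split(' ')
--     d = dict()
--     count = 0
--     for word in title:
--         if word in d:
--             count = count+1
--         else:
--             d[word] = 1
--
--     return count
-- ===== SOURCE B (Python) =====
-- def num_of_repeating_words(title):
--     words = title.split(' ')
--     return len(words) - len(set(words))
-- ===== Notes on version B (the rewrite author's own statement) =====
-- stated objective: simpler
-- what changed: Replaces the dict-membership counting loop with arithmetic on sizes: repeated occurrences = total words minus distinct words, computed as len(words) - len(set(words)).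
import Mathlib
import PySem

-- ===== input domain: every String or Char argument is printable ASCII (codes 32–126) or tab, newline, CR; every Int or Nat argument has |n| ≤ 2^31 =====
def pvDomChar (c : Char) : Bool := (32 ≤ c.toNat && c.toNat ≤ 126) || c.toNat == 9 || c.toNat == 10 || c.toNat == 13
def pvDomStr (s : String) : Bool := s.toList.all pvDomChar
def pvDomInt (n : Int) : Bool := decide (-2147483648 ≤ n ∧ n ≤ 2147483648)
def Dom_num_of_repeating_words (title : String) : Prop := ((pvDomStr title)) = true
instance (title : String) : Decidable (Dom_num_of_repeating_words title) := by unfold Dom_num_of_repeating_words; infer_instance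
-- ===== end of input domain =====

-- B replaces A's dict-membership counting loop by pure size arithmetic: total words minus distinct words (objective: simpler).

-- ===== PORT A =====
def num_of_repeating_words (title : String) : Int :=
  let words := (PySem.Str.split? title " ").getD []   -- sep ≠ "", so split? is always some
  (words.foldl
    (fun (st : PySem.Dict String Int × Int) word =>
      if st.1.contains word then (st.1, st.2 + 1)
      else (st.1.insert word 1, st.2))
    (PySem.Dict.empty, 0)).2

-- ===== PORT B =====
def num_of_repeating_words_alt (title : String) : Int :=
  let words := (PySem.Str.split? title " ").getD []
  (words.length : Int) - ((PySem.Set.ofList words).length : Int)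

-- ===== PRECONDITION & SPEC =====
def Spec_num_of_repeating_words (title : String) (out : Int) : Prop := out = num_of_repeating_words_alt title
instance (title : String) (out : Int) : Decidable (Spec_num_of_repeating_words title out) := by unfold Spec_num_of_repeating_words; infer_instance

-- ===== CLAIM (what is proved, stated in full; the proofs are below) =====
def Claim_equal_num_of_repeating_words : Prop := ∀ (title : String), Dom_num_of_repeating_words title → Spec_num_of_repeating_words title (num_of_repeating_words title)

-- ===== LEMMAS AND PROOFS =====

theorem pv_loop_inv (words : List String) :
    ∀ (d : PySem.Dict String Int) (count : Int),
    (words.foldl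
      (fun (st : PySem.Dict String Int × Int) word =>
        if st.1.contains word then (st.1, st.2 + 1)
        else (st.1.insert word 1, st.2))
      (d, count)).2
    = count + (words.length : Int)
        - ((PySem.Set.update d.keys words).length : Int) + (d.keys.length : Int) := by
  induction words with
  | nil => intro d count; simp [PySem.Set.update]
  | cons w ws ih =>
    intro d count
    by_cases h : d.contains w = true
    · have hk : w ∈ d.keys := (PySem.Dict.contains_iff_mem_keys d w).mp h
      have hadd : PySem.Set.add d.keys w = d.keys := by
        simp [PySem.Set.add, PySem.Set.contains, hk]
      simp only [List.foldl_cons, if_pos h]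
      rw [ih]
      simp [PySem.Set.update, hadd]
      omega
    · have hk : w ∉ d.keys := fun hm => h ((PySem.Dict.contains_iff_mem_keys d w).mpr hm)
      have hadd : PySem.Set.add d.keys w = d.keys ++ [w] := by
        simp [PySem.Set.add, PySem.Set.contains, hk]
      simp only [List.foldl_cons, if_neg h]
      rw [ih]
      rw [PySem.Dict.keys_insert_of_not_contains d 1 (by simpa using h)]
      simp [PySem.Set.update, hadd]
      omega

-- ===== VERDICT (by name: the statement is the Claim_ definition above) =====
theorem num_of_repeating_words_spec : Claim_equal_num_of_repeating_words := by
  intro title _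
  unfold Spec_num_of_repeating_words num_of_repeating_words num_of_repeating_words_alt
  rw [pv_loop_inv]
  simp [PySem.Set.ofList_eq_foldl, PySem.Set.update]
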